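-- pv_equiv track=rewrite | github.com/NX-2021-L/enceladus | backend/lambda/checkout_service/lambda_function.py | _normalize_api_keys
-- ===== SOURCE A (Python) =====
-- def _normalize_api_keys(*raw_values: str) -> tuple:
--     """Return deduplicated, non-empty key values from scalar/csv env sources."""
--     keys: list = []
--     seen: set = set()
--     for raw in raw_values:
--         if not raw:
--             continue
--         for part in str(raw).split(","):
--             key = part.strip()
--             if not key or key in seen:
--                 continue
--             seen.add(key)
--             keys.append(key)
--     return tuple(keys)
-- ===== SOURCE B (Python) =====
-- def _normalize_api_keys(*raw_values: str) -> tuple: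
--     """Return deduplicated, non-empty key values from scalar/csv env sources."""
--     candidates = [
--         part.strip()
--         for raw in raw_values if raw
--         for part in str(raw).split(",")
--         if part.strip()
--     ]
--     first: dict = {}
--     for index, key in enumerate(candidates):
--         first.setdefault(key, index)
--     return tuple(sorted(first, key=first.get))
-- ===== Notes on version B (the rewrite author's own statement) =====
-- stated objective: alternative
-- what changed: Instead of A's single streaming pass that appends keys while consulting a seen-set, B flattens all stripped non-empty candidates first, records each key's first-occurrence index in a dict via setdefault, and produces the output by sorting the keys on that recorded index.
import Mathlib
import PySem

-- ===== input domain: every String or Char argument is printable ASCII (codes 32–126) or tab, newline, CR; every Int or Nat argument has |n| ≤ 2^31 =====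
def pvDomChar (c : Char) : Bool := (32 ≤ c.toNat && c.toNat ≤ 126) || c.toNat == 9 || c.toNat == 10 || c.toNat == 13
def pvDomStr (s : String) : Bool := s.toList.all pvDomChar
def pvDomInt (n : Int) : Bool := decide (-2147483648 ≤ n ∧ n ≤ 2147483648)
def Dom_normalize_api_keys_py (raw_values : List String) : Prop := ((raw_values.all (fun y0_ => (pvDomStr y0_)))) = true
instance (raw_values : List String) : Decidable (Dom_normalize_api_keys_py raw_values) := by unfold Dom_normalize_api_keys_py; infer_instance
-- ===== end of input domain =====

-- B flattens the stripped non-empty CSV parts, records each key's first-occurrence index in a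
-- dict via setdefault, and outputs the keys sorted by that index — no seen-set/append pass (objective: alternative).


-- ===== PORT A =====
-- str(raw) where raw is the list of strings: Python's list repr. Exact on the Dom_ character
-- set (printable ASCII plus tab/newline/CR): quote choice and the \\ , quote, \t, \n, \r
-- escapes; every other Dom character is printable and kept literally.
def pyReprCharEsc (q : Char) (c : Char) : List Char :=
  if c = '\\' then ['\\', '\\']
  else if c = q then ['\\', q]
  else if c = '\t' then ['\\', 't']
  else if c = '\n' then ['\\', 'n']
  else if c = '\r' then ['\\', 'r']
  else [c]

def pyReprStrChars (s : String) : List Char :=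
  let cs := s.toList
  let q : Char := if cs.contains '\'' && !(cs.contains '"') then '"' else '\''
  q :: cs.flatMap (pyReprCharEsc q) ++ [q]

def pyStrOfList (l : List String) : String :=
  String.ofList ('[' :: ((l.map pyReprStrChars).intersperse [',', ' ']).flatten ++ [']'])

-- The harness calls _normalize_api_keys(raw_values) with ONE positional argument, so the
-- *args tuple is (raw_values,) and the outer 'for raw in raw_values' loop runs exactly once
-- with raw = the whole list: 'if not raw' is the list-emptiness test, str(raw) its repr.
-- raw.split(",") has a non-empty separator, so split? is always 'some'; '.getD []' only makes it total.
def normalize_api_keys_py (raw_values : List String) : List String :=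
  if raw_values = [] then []
  else
    (((PySem.Str.split? (pyStrOfList raw_values) ",").getD []).foldl
      (fun (st : List String × PySem.Set String) part =>
        let key := PySem.Str.strip part
        if key = "" ∨ PySem.Set.contains st.2 key then st
        else (st.1 ++ [key], PySem.Set.add st.2 key))
      ([], PySem.Set.empty)).1

-- ===== PORT B =====
-- Source B's first-occurrence-index dict: for index, key in enumerate(candidates): first.setdefault(key, index)
def pvFirstIdx (candidates : List String) : PySem.Dict String Int :=
  (PySem.List.enumerate candidates 0).foldl
    (fun d p => PySem.Dict.setdefault d p.2 p.1) PySem.Dict.empty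

-- Source B under the same single-argument call: the truthy filter admits the one raw (the list)
-- iff it is non-empty; candidates = [part.strip() for part in str(raw).split(",") if part.strip()];
-- then sorted(first, key=first.get) — iterate the dict's keys and sort them by their stored
-- first-occurrence index (first.get k = getD k, exact: every key iterated is present in first).
def normalize_api_keys_py_alt (raw_values : List String) : List String :=
  let candidates :=
    (if raw_values = [] then []
     else ((PySem.Str.split? (pyStrOfList raw_values) ",").getD []).filter
       (fun part => !(PySem.Str.strip part == ""))).map (fun part => PySem.Str.strip part)
  let first := pvFirstIdx candidates
  PySem.List.sorted (PySem.Dict.keys first) (fun k => PySem.Dict.getD first k 0) false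

-- ===== PRECONDITION & SPEC =====
def Spec_normalize_api_keys_py (raw_values : List String) (out : List String) : Prop := out = normalize_api_keys_py_alt raw_values
instance (raw_values : List String) (out : List String) : Decidable (Spec_normalize_api_keys_py raw_values out) := by unfold Spec_normalize_api_keys_py; infer_instance

-- ===== CLAIM (what is proved, stated in full; the proofs are below) =====
def Claim_equal_normalize_api_keys_py : Prop := ∀ (raw_values : List String), Dom_normalize_api_keys_py raw_values → Spec_normalize_api_keys_py raw_values (normalize_api_keys_py raw_values)

-- ===== LEMMAS AND PROOFS =====

-- A's inner loop body, on an already-stripped key.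
def pvStep (st : List String × PySem.Set String) (key : String) : List String × PySem.Set String :=
  if key = "" ∨ PySem.Set.contains st.2 key then st
  else (st.1 ++ [key], PySem.Set.add st.2 key)

-- A's fold over a list of candidate keys, characterised in closed form.
lemma pvFold_step (cs : List String) (keys seen : List String) :
    cs.foldl pvStep (keys, seen)
      = (keys ++ (PySem.Set.ofList (cs.filter (fun c => !(c == "")))).filter
            (fun y => !(seen.contains y)),
         PySem.Set.update seen (cs.filter (fun c => !(c == "")))) := by
  induction cs generalizing keys seen with
  | nil => simp [PySem.Set.update_nil, PySem.Set.ofList_nil]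
  | cons c cs ih =>
    by_cases hc : c = ""
    · subst hc
      simpa [pvStep] using ih keys seen
    · have hfc : List.filter (fun c => !(c == "")) (c :: cs)
          = c :: List.filter (fun c => !(c == "")) cs := by simp [hc]
      by_cases hm : c ∈ seen
      · have hstep : pvStep (keys, seen) c = (keys, seen) := by
          unfold pvStep; rw [if_pos (Or.inr ((PySem.Set.contains_iff seen c).mpr hm))]
        have h1 : List.filter (fun y => !(seen.contains y))
              ((PySem.Set.ofList (List.filter (fun c => !(c == "")) cs)).discard c)
            = List.filter (fun y => !(seen.contains y))
              (PySem.Set.ofList (List.filter (fun c => !(c == "")) cs)) := by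
          unfold PySem.Set.discard
          rw [List.filter_filter]
          apply List.filter_congr
          intro a _
          by_cases ha : a ∈ seen <;> by_cases hac : a = c <;> simp [ha, hac] <;> simp_all
        rw [List.foldl_cons, hstep, ih keys seen, hfc, PySem.Set.ofList_cons,
          PySem.Set.update_cons, PySem.Set.add_of_mem hm]
        have hdrop : (!(seen.contains c)) = false := by simp [hm]
        rw [List.filter_cons, hdrop]
        simp only [h1, Bool.false_eq_true, if_false]
      · have hstep : pvStep (keys, seen) c = (keys ++ [c], seen ++ [c]) := by
          simp [pvStep, hc, hm]
        have h1 : List.filter (fun y => !((seen ++ [c]).contains y))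
              (PySem.Set.ofList (List.filter (fun c => !(c == "")) cs))
            = List.filter (fun y => !(seen.contains y))
              ((PySem.Set.ofList (List.filter (fun c => !(c == "")) cs)).discard c) := by
          unfold PySem.Set.discard
          rw [List.filter_filter]
          apply List.filter_congr
          intro a _
          by_cases ha : a ∈ seen <;> by_cases hac : a = c <;> simp [ha, hac]
        rw [List.foldl_cons, hstep, ih (keys ++ [c]) (seen ++ [c]), hfc, PySem.Set.ofList_cons,
          PySem.Set.update_cons, PySem.Set.add_of_not_mem hm, h1]
        have hkeep : (!(seen.contains c)) = true := by simp [hm]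
        rw [List.filter_cons, hkeep]
        simp

-- Invariant of the setdefault loop: the dict's keys are the first occurrences in order and the
-- stored first-occurrence indices are strictly increasing along the key list (and all < s + len).
lemma pvFirst_inv (l : List String) : ∀ (s : Int) (d : PySem.Dict String Int),
    d.keys.Nodup → (∀ k ∈ d.keys, d.getD k 0 < s) →
    d.keys.Pairwise (fun a b => d.getD a 0 < d.getD b 0) →
    ((PySem.List.enumerate l s).foldl (fun d p => PySem.Dict.setdefault d p.2 p.1) d).keys
        = PySem.Set.update d.keys l ∧
      ((PySem.List.enumerate l s).foldl (fun d p => PySem.Dict.setdefault d p.2 p.1) d).keys.Nodup ∧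
      (∀ k ∈ ((PySem.List.enumerate l s).foldl (fun d p => PySem.Dict.setdefault d p.2 p.1) d).keys,
        ((PySem.List.enumerate l s).foldl (fun d p => PySem.Dict.setdefault d p.2 p.1) d).getD k 0
          < s + l.length) ∧
      ((PySem.List.enumerate l s).foldl (fun d p => PySem.Dict.setdefault d p.2 p.1) d).keys.Pairwise
        (fun a b => ((PySem.List.enumerate l s).foldl (fun d p => PySem.Dict.setdefault d p.2 p.1) d).getD a 0
          < ((PySem.List.enumerate l s).foldl (fun d p => PySem.Dict.setdefault d p.2 p.1) d).getD b 0) := by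
  induction l with
  | nil =>
    intro s d hnd hlt hpw
    simp only [PySem.List.enumerate_nil, List.foldl_nil, List.length_nil]
    exact ⟨(PySem.Set.update_nil d.keys).symm, hnd,
      fun k hk => by have := hlt k hk; push_cast; omega, hpw⟩
  | cons x t ih =>
    intro s d hnd hlt hpw
    rw [PySem.List.enumerate_cons, List.foldl_cons]
    by_cases hc : d.contains x = true
    · have hd1 : PySem.Dict.setdefault d x s = d := PySem.Dict.setdefault_of_contains d s hc
      have hxmem : x ∈ d.keys := (PySem.Dict.contains_iff_mem_keys d x).mp hc
      have hres := ih (s + 1) d hnd (fun k hk => by have := hlt k hk; omega) hpw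
      rw [hd1]
      refine ⟨?_, hres.2.1, ?_, hres.2.2.2⟩
      · rw [hres.1, PySem.Set.update_cons, PySem.Set.add_of_mem hxmem]
      · intro k hk
        have := hres.2.2.1 k hk
        push_cast [List.length_cons] at this ⊢
        omega
    · have hc' : d.contains x = false := by simpa using hc
      have hd1 : PySem.Dict.setdefault d x s = d.insert x s :=
        PySem.Dict.setdefault_of_not_contains d s hc'
      have hxnot : x ∉ d.keys := fun hm => hc ((PySem.Dict.contains_iff_mem_keys d x).mpr hm)
      have hkeys1 : (d.insert x s).keys = d.keys ++ [x] :=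
        PySem.Dict.keys_insert_of_not_contains d s hc'
      have hnd1 : (d.insert x s).keys.Nodup := by
        rw [hkeys1]
        simpa [List.nodup_append] using ⟨hnd, fun a ha h => hxnot (h ▸ ha)⟩
      have hget1 : ∀ k, (d.insert x s).getD k 0 = if k = x then s else d.getD k 0 :=
        fun k => PySem.Dict.getD_insert d x k s 0
      have hlt1 : ∀ k ∈ (d.insert x s).keys, (d.insert x s).getD k 0 < s + 1 := by
        intro k hk
        rw [hget1 k]
        split_ifs with h
        · omega
        · rw [hkeys1] at hk
          rcases List.mem_append.mp hk with h' | h'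
          · have := hlt k h'; omega
          · simp at h'; exact absurd h' h
      have hpw1 : (d.insert x s).keys.Pairwise
          (fun a b => (d.insert x s).getD a 0 < (d.insert x s).getD b 0) := by
        rw [hkeys1, List.pairwise_append]
        refine ⟨?_, List.pairwise_singleton _ _, ?_⟩
        · refine hpw.imp_of_mem (fun {a} {b} ha hb hab => ?_)
          have hax : a ≠ x := fun h => hxnot (h ▸ ha)
          have hbx : b ≠ x := fun h => hxnot (h ▸ hb)
          rw [hget1 a, hget1 b, if_neg hax, if_neg hbx]
          exact hab
        · intro a ha b hb
          simp only [List.mem_singleton] at hb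
          have hax : a ≠ x := fun h => hxnot (h ▸ ha)
          rw [hb, hget1 a, hget1 x, if_neg hax, if_pos rfl]
          exact hlt a ha
      have hres := ih (s + 1) (d.insert x s) hnd1 hlt1 hpw1
      rw [hd1]
      refine ⟨?_, hres.2.1, ?_, hres.2.2.2⟩
      · rw [hres.1, hkeys1, PySem.Set.update_cons, PySem.Set.add_of_not_mem hxnot]
      · intro k hk
        have := hres.2.2.1 k hk
        push_cast [List.length_cons] at this ⊢
        omega

-- sorting the dict's keys by their first-occurrence index returns set(candidates)'s ordered list.
lemma pvSorted_first (l : List String) :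
    PySem.List.sorted (PySem.Dict.keys (pvFirstIdx l))
      (fun k => PySem.Dict.getD (pvFirstIdx l) k 0) false = PySem.Set.ofList l := by
  have hres := pvFirst_inv l 0 PySem.Dict.empty
    (by simp [PySem.Dict.keys_empty])
    (by simp [PySem.Dict.keys_empty])
    (by simp [PySem.Dict.keys_empty])
  have hkeys : (pvFirstIdx l).keys = PySem.Set.ofList l := by
    have := hres.1
    rwa [PySem.Dict.keys_empty, PySem.Set.update_nil_left] at this
  unfold pvFirstIdx at hkeys ⊢
  rw [PySem.List.sorted_eq_of_perm_of_pairwise_lt _ _ _ (List.Perm.refl _) hres.2.2.2, hkeys]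

-- ===== VERDICT (by name: the statement is the Claim_ definition above) =====
theorem normalize_api_keys_py_spec : Claim_equal_normalize_api_keys_py := by
  intro raw_values _
  unfold Spec_normalize_api_keys_py normalize_api_keys_py normalize_api_keys_py_alt
  by_cases h : raw_values = []
  · rw [if_pos h]
    simp [pvSorted_first, h]
  · rw [if_neg h, if_neg h]
    have hfold :
        (((PySem.Str.split? (pyStrOfList raw_values) ",").getD []).foldl
          (fun (st : List String × PySem.Set String) part =>
            let key := PySem.Str.strip part
            if key = "" ∨ PySem.Set.contains st.2 key then st
            else (st.1 ++ [key], PySem.Set.add st.2 key))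
          ([], PySem.Set.empty))
        = (((PySem.Str.split? (pyStrOfList raw_values) ",").getD []).map
            (fun part => PySem.Str.strip part)).foldl pvStep ([], PySem.Set.empty) := by
      rw [List.foldl_map]
      rfl
    rw [hfold, pvFold_step]
    simp only []
    rw [pvSorted_first, List.filter_map]
    simp [Function.comp_def]
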